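-- pv_equiv track=rewrite | github.com/JoSihun/ThisIsCodingTest | Part3_Chapter13/p351_13-20.py | solution
-- ===== SOURCE A (Python) =====
-- from itertools import combinations
--
-- def watch(x, y, array):
--     temp_x, temp_y = x, y
--     while 0 <= temp_x:
--         if array[temp_x][temp_y] == 'S':
--             return True
--         if array[temp_x][temp_y] == 'O':
--             break
--         temp_x -= 1
--     temp_x, temp_y = x, y
--     while temp_x < len(array):
--         if array[temp_x][temp_y] == 'S':
--             return True
--         if array[temp_x][temp_y] == 'O':
--             break
--         temp_x += 1
--     temp_x, temp_y = x, y
--     while 0 <= temp_y: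
--         if array[temp_x][temp_y] == 'S':
--             return True
--         if array[temp_x][temp_y] == 'O':
--             break
--         temp_y -= 1
--     temp_x, temp_y = x, y
--     while temp_y < len(array):
--         if array[temp_x][temp_y] == 'S':
--             return True
--         if array[temp_x][temp_y] == 'O':
--             break
--         temp_y += 1
--     return False
--
-- def solution(n, array):
--     spaces = []
--     teachers = []
--     for i in range(n):
--         for j in range(n):
--             if array[i][j] == 'X':
--                 spaces.append((i, j))
--             if array[i][j] == 'T':
--                 teachers.append((i, j))
--
--     candidates = list(combinations(spaces, 3))
--     for candidate in candidates:
--         for x, y in candidate: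
--             array[x][y] = 'O'
--         count = 0
--         for x, y in teachers:
--             if not watch(x, y, array):
--                 count += 1
--         if count == len(teachers):
--             return 'YES'
--         for x, y in candidate:
--             array[x][y] = 'X'
--
--     return 'NO'
-- ===== SOURCE B (Python) =====
-- def solution(n, array):
--     size = len(array)
--     spaces = [(i, j) for i in range(n) for j in range(n) if array[i][j] == 'X']
--     teachers = [(i, j) for i in range(n) for j in range(n) if array[i][j] == 'T']
--     if len(spaces) < 3:
--         return 'NO'
--
--     # For each teacher and direction, find the first 'S' on the ray (stopping at a
--     # pre-existing 'O'); blocking it requires a wall on one of the 'X' cells in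
--     # between.  Collect these sets as hitting-set constraints.
--     constraints = []
--     for (x, y) in teachers:
--         for dx, dy in ((-1, 0), (1, 0), (0, -1), (0, 1)):
--             gap = []
--             i, j = x + dx, y + dy
--             while 0 <= i < size and 0 <= j < size:
--                 cell = array[i][j]
--                 if cell == 'S':
--                     constraints.append(gap)
--                     break
--                 if cell == 'O':
--                     break
--                 if cell == 'X':
--                     gap.append((i, j))
--                 i, j = i + dx, j + dy
--
--     # Bounded-depth branching: any wall set of size <= 3 hitting all constraints
--     # exists iff some exact 3-subset of the (>= 3) spaces does.
--     def solve(walls):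
--         unsat = next((C for C in constraints
--                       if not any(w in walls for w in C)), None)
--         if unsat is None:
--             return True
--         if len(walls) >= 3:
--             return False
--         return any(solve(walls + [c]) for c in unsat)
--
--     return 'YES' if solve([]) else 'NO'
-- ===== Notes on version B (the rewrite author's own statement) =====
-- stated objective: faster
-- what changed: Instead of enumerating every 3-subset of empty cells and re-scanning each teacher's four rays per candidate, B extracts once, per teacher and direction, the set of 'X' cells between the teacher and the first visible student as a hitting-set constraint, and decides with a depth-3 branch-on-an-unsatisfied-constraint search whether <=3 walls can hit all constraints.
-- outside the precondition, e.g. on solution(2, [['X', 'T', 'x'], ['X', 'X', 'x'], ['S']]): A returns 'YES', B raises IndexError; on solution(2, [['X', 'X'], ['X', 'X'], ['S', 'S']]): A returns 'YES', B returns 'YES'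
import Mathlib
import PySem

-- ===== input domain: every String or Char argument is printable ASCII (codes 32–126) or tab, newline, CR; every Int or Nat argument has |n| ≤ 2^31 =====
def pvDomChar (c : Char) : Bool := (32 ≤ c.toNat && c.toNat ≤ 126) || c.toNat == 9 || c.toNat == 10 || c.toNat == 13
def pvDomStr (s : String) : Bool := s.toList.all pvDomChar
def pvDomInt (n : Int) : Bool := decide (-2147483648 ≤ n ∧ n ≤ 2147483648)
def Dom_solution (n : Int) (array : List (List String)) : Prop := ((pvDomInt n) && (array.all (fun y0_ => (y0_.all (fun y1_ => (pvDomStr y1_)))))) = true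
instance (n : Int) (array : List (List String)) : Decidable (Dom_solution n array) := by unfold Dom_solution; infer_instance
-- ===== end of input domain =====

-- B replaces A's brute force over all 3-subsets of empty cells (placing walls on the board and
-- re-scanning every teacher's four rays per candidate) by a hitting-set formulation: it extracts,
-- once per teacher and direction, the set of 'X' cells between the teacher and the first visible
-- student as a constraint, and decides with a depth-3 branch-on-an-unsatisfied-constraint search
-- whether at most 3 walls can hit every constraint.  Equivalence is about the RETURN value only
-- (Python A mutates `array` in place and leaves the three 'O' marks on it when it returns 'YES').

-- ===== PORT A =====
-- array[x][y] (indices are nonnegative and in range on every use admitted by Pre_)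
def pvCell (g : List (List String)) (x y : Int) : String :=
  PySem.List.pyGetD (PySem.List.pyGetD g x []) y ""

-- array[x][y] = v  (functional update standing for A's in-place row assignment)
def pvSet2 (g : List (List String)) (x y : Int) (v : String) : List (List String) :=
  PySem.List.pySetD g x (PySem.List.pySetD (PySem.List.pyGetD g x []) y v)

-- `while 0 <= temp_x:` loop of watch (vertical, upwards)
def wUp (g : List (List String)) (y : Int) (t : Int) : Bool :=
  if _h : t < 0 then false
  else if pvCell g t y == "S" then true
  else if pvCell g t y == "O" then false
  else wUp g y (t - 1)
termination_by (t + 1).toNat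
decreasing_by omega

-- `while temp_x < len(array):` loop (vertical, downwards)
def wDown (g : List (List String)) (y : Int) (t : Int) : Bool :=
  if _h : t < PySem.List.len g then
    if pvCell g t y == "S" then true
    else if pvCell g t y == "O" then false
    else wDown g y (t + 1)
  else false
termination_by (PySem.List.len g - t).toNat
decreasing_by simp only [PySem.List.len_eq] at *; omega

-- `while 0 <= temp_y:` loop (horizontal, leftwards)
def wLeft (g : List (List String)) (x : Int) (t : Int) : Bool :=
  if _h : t < 0 then false
  else if pvCell g x t == "S" then true
  else if pvCell g x t == "O" then false
  else wLeft g x (t - 1)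
termination_by (t + 1).toNat
decreasing_by omega

-- `while temp_y < len(array):` loop (horizontal, rightwards; A uses len(array) for the column bound too)
def wRight (g : List (List String)) (x : Int) (t : Int) : Bool :=
  if _h : t < PySem.List.len g then
    if pvCell g x t == "S" then true
    else if pvCell g x t == "O" then false
    else wRight g x (t + 1)
  else false
termination_by (PySem.List.len g - t).toNat
decreasing_by simp only [PySem.List.len_eq] at *; omega

def watch (x y : Int) (g : List (List String)) : Bool :=
  wUp g y x || wDown g y x || wLeft g x y || wRight g x y

-- `for x, y in candidate: array[x][y] = v`
def pvPlace (g : List (List String)) (c : List (Int × Int)) (v : String) : List (List String) :=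
  c.foldl (fun h p => pvSet2 h p.1 p.2 v) g

-- `for candidate in candidates:` loop of A's solution
def aloop (teachers : List (Int × Int)) (g : List (List String)) :
    List (List (Int × Int)) → String
  | [] => "NO"
  | c :: rest =>
    let g' := pvPlace g c "O"
    let count : Int :=
      teachers.foldl (fun cnt p => if !(watch p.1 p.2 g') then cnt + 1 else cnt) 0
    if count == PySem.List.len teachers then "YES"
    else aloop teachers (pvPlace g' c "X") rest

def solution (n : Int) (array : List (List String)) : String :=
  let collected :=
    (PySem.List.pyRange 0 n 1).foldl (fun (acc : List (Int × Int) × List (Int × Int)) i =>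
      (PySem.List.pyRange 0 n 1).foldl (fun acc2 j =>
        let acc3 := if pvCell array i j == "X" then (acc2.1 ++ [(i, j)], acc2.2) else acc2
        if pvCell array i j == "T" then (acc3.1, acc3.2 ++ [(i, j)]) else acc3) acc) ([], [])
  aloop collected.2 array (PySem.List.combinations collected.1 3)

-- ===== PORT B =====
-- array[x][y] (read-only access; B never writes the board)
def pvAt (g : List (List String)) (x y : Int) : String :=
  PySem.List.pyGetD (PySem.List.pyGetD g x []) y ""

-- [(i, j) for i in range(n) for j in range(n) if array[i][j] == s]
def pvCollect (g : List (List String)) (n : Int) (s : String) : List (Int × Int) :=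
  (PySem.List.pyRange 0 n 1).flatMap (fun i =>
    ((PySem.List.pyRange 0 n 1).filter (fun j => pvAt g i j == s)).map (fun j => (i, j)))

-- the `while 0 <= i < size and 0 <= j < size:` gap scan of B, one teacher, one direction;
-- the Nat fuel only makes the loop total in Lean: for a unit direction the scan leaves the
-- board within `size` steps, so the fuel `size + 1` supplied below is never exhausted
def pvGap (g : List (List String)) (dx dy : Int) :
    Nat → Int → Int → List (Int × Int) → Option (List (Int × Int))
  | 0, _, _, _ => none
  | fuel + 1, i, j, gap =>
    if 0 ≤ i ∧ i < PySem.List.len g ∧ 0 ≤ j ∧ j < PySem.List.len g then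
      if pvAt g i j == "S" then some gap
      else if pvAt g i j == "O" then none
      else pvGap g dx dy fuel (i + dx) (j + dy)
             (if pvAt g i j == "X" then gap ++ [(i, j)] else gap)
    else none

-- the four directions ((-1,0),(1,0),(0,-1),(0,1))
def pvDirs : List (Int × Int) := [(-1, 0), (1, 0), (0, -1), (0, 1)]

-- `for (x, y) in teachers: for dx, dy in …: … constraints.append(gap)`
def pvCons (g : List (List String)) (teachers : List (Int × Int)) : List (List (Int × Int)) :=
  teachers.foldl (fun acc p =>
    pvDirs.foldl (fun acc2 d =>
      match pvGap g d.1 d.2 (g.length + 1) (p.1 + d.1) (p.2 + d.2) [] with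
      | some gap => acc2 ++ [gap]
      | none => acc2) acc) []

-- `def solve(walls): …` — branch on the first constraint not hit by the chosen walls
def pvSolve (cons : List (List (Int × Int))) (walls : List (Int × Int)) : Bool :=
  match cons.find? (fun C => !(C.any (fun w => decide (w ∈ walls)))) with
  | none => true
  | some C =>
    if _h : 3 ≤ walls.length then false
    else C.any (fun c => pvSolve cons (walls ++ [c]))
termination_by 3 - walls.length
decreasing_by simp only [List.length_append, List.length_cons, List.length_nil]; omega

def solution_alt (n : Int) (array : List (List String)) : String :=
  let spaces := pvCollect array n "X"
  let teachers := pvCollect array n "T"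
  if spaces.length < 3 then "NO"
  else if pvSolve (pvCons array teachers) [] then "YES" else "NO"

-- ===== PRECONDITION & SPEC =====
-- Pre_: either the problem's natural domain — an n×n board (n = len(array), every row of length n) —
-- or any board readable up to n×n whose n×n prefix holds fewer than 3 'X' cells (then A returns 'NO'
-- before ever scanning).  Excluded: non-square boards with ≥ 3 'X' in the prefix, where A's watch uses
-- len(array) as the bound of BOTH axes and may raise or scan cells outside the n×n board.
def Pre_solution (n : Int) (array : List (List String)) : Prop :=
  (n = PySem.List.len array ∧ ∀ r ∈ array, PySem.List.len r = PySem.List.len array)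
  ∨ (n ≤ PySem.List.len array ∧ (∀ r ∈ array.take n.toNat, n ≤ PySem.List.len r)
     ∧ ((PySem.List.pyRange 0 n 1).map (fun i =>
          ((PySem.List.pyRange 0 n 1).filter (fun j =>
            PySem.List.pyGetD (PySem.List.pyGetD array i []) j "" == "X")).length)).sum < 3)
instance (n : Int) (array : List (List String)) : Decidable (Pre_solution n array) := by
  unfold Pre_solution; infer_instance

def pvWitness_solution : Int × List (List String) :=
  (3, [["S", "X", "X"], ["X", "T", "X"], ["X", "X", "X"]])

def Spec_solution (n : Int) (array : List (List String)) (out : String) : Prop :=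
  out = solution_alt n array
instance (n : Int) (array : List (List String)) (out : String) :
    Decidable (Spec_solution n array out) := by unfold Spec_solution; infer_instance

-- ===== CLAIM (what is proved, stated in full; the proofs are below) =====
def Claim_equal_solution : Prop :=
  ∀ (n : Int) (array : List (List String)), Dom_solution n array →
    Pre_solution n array → Spec_solution n array (solution n array)

-- ===== LEMMAS AND PROOFS =====

-- an n×n board, as positional facts
def SqN (g : List (List String)) (N : Nat) : Prop :=
  g.length = N ∧ ∀ i, (h : i < g.length) → g[i].length = N

-- positions in range of an N×N board
def InR (N : Nat) (p : Int × Int) : Prop :=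
  0 ≤ p.1 ∧ p.1 < (N : Int) ∧ 0 ≤ p.2 ∧ p.2 < (N : Int)

-- "every constraint is hit by a wall of W"
def HitAll (cons : List (List (Int × Int))) (W : List (Int × Int)) : Prop :=
  ∀ C ∈ cons, ∃ x ∈ C, x ∈ W

theorem pvAt_eq_pvCell : pvAt = pvCell := rfl

theorem pvCell_natCast (g : List (List String)) (i j : Nat)
    (hi : i < g.length) (hj : j < g[i].length) :
    pvCell g (i : Int) (j : Int) = g[i][j] := by
  simp [pvCell, PySem.List.pyGetD_natCast, hi, hj, List.getD_eq_getElem?_getD,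
    List.getElem?_eq_getElem]

theorem sq_pvSet2 {g : List (List String)} {N : Nat} (hsq : SqN g N) (x y : Int) (v : String)
    (hx : 0 ≤ x) : SqN (pvSet2 g x y v) N := by
  obtain ⟨hl, hr⟩ := hsq
  unfold pvSet2
  rw [PySem.List.pySetD_of_nonneg _ _ hx]
  refine ⟨by simpa using hl, ?_⟩
  intro i hi
  rw [List.getElem_set]
  split
  · rename_i hix
    by_cases hxr : x.toNat < g.length
    · rw [PySem.List.pyGetD_of_nonneg _ _ hx, List.getD_eq_getElem _ _ hxr,
        PySem.List.length_pySetD]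
      exact hr _ hxr
    · exfalso; simp at hi; omega
  · exact hr i (by simpa using hi)

theorem pvCell_pvSet2 {g : List (List String)} {N : Nat} (hsq : SqN g N)
    (x y i j : Int) (v : String) (hx : InR N (x, y)) (hi : InR N (i, j)) :
    pvCell (pvSet2 g x y v) i j = if i = x ∧ j = y then v else pvCell g i j := by
  obtain ⟨hl, hr⟩ := hsq
  obtain ⟨hx1, hx2, hy1, hy2⟩ := hx
  obtain ⟨hi1, hi2, hj1, hj2⟩ := hi
  simp only at *
  have hxN : x.toNat < g.length := by omega
  have hrowx : (PySem.List.pyGetD g x ([] : List String)) = g[x.toNat] := by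
    rw [PySem.List.pyGetD_eq_getElem _ _ hx1 (by omega)]
  have hrowlen : g[x.toNat].length = N := hr _ hxN
  unfold pvSet2 pvCell
  rw [PySem.List.pySetD_of_nonneg _ _ hx1, hrowx, PySem.List.pySetD_of_nonneg _ _ hy1]
  rw [PySem.List.pyGetD_eq_getElem _ _ hi1 (by simp; omega)]
  rw [List.getElem_set]
  by_cases hix : i = x
  · subst hix
    rw [if_pos (by rfl)]
    rw [PySem.List.pyGetD_eq_getElem _ _ hj1 (by simp [hrowlen]; omega)]
    rw [List.getElem_set]
    rw [PySem.List.pyGetD_eq_getElem (i := i) _ _ hi1 (by omega), PySem.List.pyGetD_eq_getElem _ _ hj1 (by rw [hrowlen]; omega)]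
    by_cases hjy : j = y
    · subst hjy
      rw [if_pos (by rfl), if_pos ⟨rfl, rfl⟩]
    · rw [if_neg (by omega), if_neg (by simp [hjy])]
  · rw [if_neg (by omega), if_neg (by simp [hix])]
    rw [PySem.List.pyGetD_eq_getElem (i := i) _ _ hi1 (by omega), PySem.List.pyGetD_eq_getElem _ _ hj1 (by rw [hr _ (by omega)]; omega)]

theorem sq_pvPlace {g : List (List String)} {N : Nat} (hsq : SqN g N)
    (c : List (Int × Int)) (v : String) (hc : ∀ p ∈ c, InR N p) :
    SqN (pvPlace g c v) N := by
  induction c generalizing g with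
  | nil => exact hsq
  | cons p rest ih =>
    have hp := hc p (by simp)
    exact ih (sq_pvSet2 hsq p.1 p.2 v hp.1) (fun q hq => hc q (by simp [hq]))

theorem pvCell_pvPlace {g : List (List String)} {N : Nat} (hsq : SqN g N)
    {c : List (Int × Int)} (v : String) (hc : ∀ p ∈ c, InR N p)
    (i j : Int) (hi : InR N (i, j)) :
    pvCell (pvPlace g c v) i j = if (i, j) ∈ c then v else pvCell g i j := by
  induction c generalizing g with
  | nil => simp [pvPlace]
  | cons p rest ih =>
    have hp := hc p (by simp)
    have hstep : pvPlace g (p :: rest) v = pvPlace (pvSet2 g p.1 p.2 v) rest v := rfl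
    rw [hstep, ih (sq_pvSet2 hsq p.1 p.2 v hp.1) (fun q hq => hc q (by simp [hq]))]
    by_cases hmem : (i, j) ∈ rest
    · simp [hmem]
    · rw [if_neg hmem]
      rw [pvCell_pvSet2 hsq p.1 p.2 i j v (by exact hp) hi]
      by_cases hpe : (i, j) = p
      · have : i = p.1 ∧ j = p.2 := by rw [← hpe]; exact ⟨rfl, rfl⟩
        simp [this, hpe]
      · have : ¬(i = p.1 ∧ j = p.2) := by
          intro ⟨h1, h2⟩; exact hpe (by rw [Prod.ext_iff]; exact ⟨h1, h2⟩)
        simp [this, hpe, hmem]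

theorem grid_ext {g₁ g₂ : List (List String)} {N : Nat}
    (h1 : SqN g₁ N) (h2 : SqN g₂ N)
    (h : ∀ i j : Nat, i < N → j < N → pvCell g₁ (i : Int) (j : Int) = pvCell g₂ (i : Int) (j : Int)) :
    g₁ = g₂ := by
  obtain ⟨hl1, hr1⟩ := h1
  obtain ⟨hl2, hr2⟩ := h2
  apply List.ext_getElem (by omega)
  intro i hi1 hi2
  apply List.ext_getElem (by rw [hr1 i hi1, hr2 i hi2])
  intro j hj1 hj2
  have hiN : i < N := by omega
  have hjN : j < N := by rw [hr1 i hi1] at hj1; exact hj1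
  have := h i j hiN hjN
  rwa [pvCell_natCast g₁ i j hi1 hj1, pvCell_natCast g₂ i j hi2 hj2] at this

theorem place_restore {g : List (List String)} {N : Nat} (hsq : SqN g N)
    {c : List (Int × Int)} (hc : ∀ p ∈ c, InR N p)
    (hX : ∀ p ∈ c, pvCell g p.1 p.2 = "X") :
    pvPlace (pvPlace g c "O") c "X" = g := by
  have hsq1 : SqN (pvPlace g c "O") N := sq_pvPlace hsq c "O" hc
  have hsq2 : SqN (pvPlace (pvPlace g c "O") c "X") N := sq_pvPlace hsq1 c "X" hc
  apply grid_ext hsq2 hsq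
  intro i j hiN hjN
  have hij : InR N ((i : Int), (j : Int)) := by
    constructor <;> simp <;> omega
  rw [pvCell_pvPlace hsq1 "X" hc _ _ hij, pvCell_pvPlace hsq "O" hc _ _ hij]
  by_cases hmem : ((i : Int), (j : Int)) ∈ c
  · rw [if_pos hmem, (hX _ hmem).symm]
  · simp [hmem]

-- the Bool test A's inner loop computes for one candidate
def chkA (teachers : List (Int × Int)) (g : List (List String)) (c : List (Int × Int)) : Bool :=
  (teachers.foldl (fun (cnt : Int) p =>
      if !(watch p.1 p.2 (pvPlace g c "O")) then cnt + 1 else cnt) 0) == PySem.List.len teachers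

theorem chkA_eq_all (teachers : List (Int × Int)) (g : List (List String)) (c : List (Int × Int)) :
    chkA teachers g c = teachers.all (fun p => !(watch p.1 p.2 (pvPlace g c "O"))) := by
  unfold chkA
  rw [PySem.List.foldl_count_if (fun p => !(watch p.1 p.2 (pvPlace g c "O"))) teachers 0]
  rw [Bool.eq_iff_iff]
  simp only [beq_iff_eq, zero_add, PySem.List.len_eq, Int.natCast_inj, List.all_eq_true]
  exact List.countP_eq_length

theorem aloop_eq {g : List (List String)} {N : Nat} (hsq : SqN g N)
    (teachers : List (Int × Int)) (cands : List (List (Int × Int)))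
    (hc : ∀ c ∈ cands, (∀ p ∈ c, InR N p) ∧ (∀ p ∈ c, pvCell g p.1 p.2 = "X")) :
    aloop teachers g cands = if cands.any (chkA teachers g) then "YES" else "NO" := by
  induction cands with
  | nil => simp [aloop]
  | cons c rest ih =>
    obtain ⟨hc1, hc2⟩ := hc c (by simp)
    have hrest : pvPlace (pvPlace g c "O") c "X" = g := place_restore hsq hc1 hc2
    show (if chkA teachers g c then "YES"
        else aloop teachers (pvPlace (pvPlace g c "O") c "X") rest) = _
    rw [hrest, List.any_cons]
    by_cases hb : chkA teachers g c = true
    · simp [hb]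
    · simp only [Bool.not_eq_true] at hb
      simp [hb, ih (fun c hm => hc c (by simp [hm]))]

theorem collect_inner (g : List (List String)) (i : Int) (l : List Int)
    (acc : List (Int × Int) × List (Int × Int)) :
    l.foldl (fun acc2 j =>
        let acc3 := if pvCell g i j == "X" then (acc2.1 ++ [(i, j)], acc2.2) else acc2
        if pvCell g i j == "T" then (acc3.1, acc3.2 ++ [(i, j)]) else acc3) acc
      = (acc.1 ++ (l.filter (fun j => pvAt g i j == "X")).map (fun j => (i, j)),
         acc.2 ++ (l.filter (fun j => pvAt g i j == "T")).map (fun j => (i, j))) := by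
  induction l generalizing acc with
  | nil => simp
  | cons j l ihl =>
    rw [List.foldl_cons, ihl]
    by_cases hX : pvCell g i j = "X"
    · have hT : (pvCell g i j == "T") = false := by simp [hX]
      simp [pvAt_eq_pvCell, List.filter_cons, hX, hT]
    · by_cases hT : pvCell g i j = "T"
      · simp [pvAt_eq_pvCell, List.filter_cons, hX, hT]
      · simp [pvAt_eq_pvCell, List.filter_cons, hX, hT]

theorem collect_eq (g : List (List String)) (n : Int) :
    (PySem.List.pyRange 0 n 1).foldl (fun (acc : List (Int × Int) × List (Int × Int)) i =>
      (PySem.List.pyRange 0 n 1).foldl (fun acc2 j =>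
        let acc3 := if pvCell g i j == "X" then (acc2.1 ++ [(i, j)], acc2.2) else acc2
        if pvCell g i j == "T" then (acc3.1, acc3.2 ++ [(i, j)]) else acc3) acc) ([], [])
      = (pvCollect g n "X", pvCollect g n "T") := by
  simp only [collect_inner]
  rw [PySem.List.foldl_prod_mk
    (fun a i => a ++ ((PySem.List.pyRange 0 n 1).filter (fun j => pvAt g i j == "X")).map (fun j => (i, j)))
    (fun a i => a ++ ((PySem.List.pyRange 0 n 1).filter (fun j => pvAt g i j == "T")).map (fun j => (i, j)))]
  rw [PySem.List.foldl_append_eq_flatMap, PySem.List.foldl_append_eq_flatMap]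
  simp [pvCollect]

theorem mem_pvCollect (g : List (List String)) (n : Int) (s : String) (p : Int × Int) :
    p ∈ pvCollect g n s ↔ (0 ≤ p.1 ∧ p.1 < n ∧ 0 ≤ p.2 ∧ p.2 < n ∧ pvAt g p.1 p.2 = s) := by
  obtain ⟨a, b⟩ := p
  simp only [pvCollect, List.mem_flatMap, List.mem_map, List.mem_filter,
    PySem.List.mem_pyRange_one, beq_iff_eq]
  constructor
  · rintro ⟨i, hi, j, ⟨hj, hs⟩, he⟩
    rw [Prod.mk.injEq] at he
    obtain ⟨h1, h2⟩ := he
    subst h1; subst h2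
    exact ⟨hi.1, hi.2, hj.1, hj.2, hs⟩
  · rintro ⟨h1, h2, h3, h4, h5⟩
    exact ⟨a, ⟨h1, h2⟩, b, ⟨⟨h3, h4⟩, h5⟩, rfl⟩

theorem length_pvCollect (g : List (List String)) (n : Int) (s : String) :
    (pvCollect g n s).length
      = ((PySem.List.pyRange 0 n 1).map (fun i =>
          ((PySem.List.pyRange 0 n 1).filter (fun j =>
            PySem.List.pyGetD (PySem.List.pyGetD g i []) j "" == s)).length)).sum := by
  simp [pvCollect, pvAt, List.length_flatMap, Function.comp]

-- ===== B-side characterisation =====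

-- accumulator generalisation for the gap scan
theorem pvGap_acc (g : List (List String)) (dx dy : Int) :
    ∀ (fuel : Nat) (i j : Int) (acc : List (Int × Int)),
      pvGap g dx dy fuel i j acc = (pvGap g dx dy fuel i j []).map (fun C => acc ++ C) := by
  intro fuel
  induction fuel with
  | zero => intro i j acc; rfl
  | succ fuel ih =>
    intro i j acc
    show pvGap g dx dy (fuel + 1) i j acc = _
    rw [pvGap, pvGap]
    by_cases hb : 0 ≤ i ∧ i < PySem.List.len g ∧ 0 ≤ j ∧ j < PySem.List.len g
    · rw [if_pos hb, if_pos hb]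
      by_cases hS : pvAt g i j = "S"
      · simp [hS]
      · by_cases hO : pvAt g i j = "O"
        · simp [hS, hO]
        · simp only [hS, hO, beq_iff_eq, if_false, if_neg hS, if_neg hO]
          by_cases hX : pvAt g i j = "X"
          · rw [if_pos (by simp [hX]), if_pos (by simp [hX])]
            rw [ih _ _ (acc ++ [(i, j)]), ih _ _ ([] ++ [(i, j)])]
            cases pvGap g dx dy fuel (i + dx) (j + dy) [] <;> simp
          · rw [if_neg (by simp [hX]), if_neg (by simp [hX])]
            exact ih _ _ acc
    · rw [if_neg hb, if_neg hb]; rfl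

-- every cell a successful gap scan collects is an in-range 'X' cell (beyond what was accumulated)
theorem pvGap_cells {g : List (List String)} {N : Nat} (hsq : SqN g N) (dx dy : Int) :
    ∀ (fuel : Nat) (i j : Int) (acc C : List (Int × Int)),
      pvGap g dx dy fuel i j acc = some C →
      ∀ p ∈ C, p ∈ acc ∨ (InR N p ∧ pvCell g p.1 p.2 = "X") := by
  intro fuel
  induction fuel with
  | zero => intro i j acc C h; exact absurd h (by simp [pvGap])
  | succ fuel ih =>
    intro i j acc C h p hp
    rw [pvGap] at h
    by_cases hb : 0 ≤ i ∧ i < PySem.List.len g ∧ 0 ≤ j ∧ j < PySem.List.len g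
    · rw [if_pos hb] at h
      by_cases hS : pvAt g i j = "S"
      · rw [if_pos (by simp [hS])] at h
        cases h; exact Or.inl hp
      · rw [if_neg (by simp [hS])] at h
        by_cases hO : pvAt g i j = "O"
        · rw [if_pos (by simp [hO])] at h; cases h
        · rw [if_neg (by simp [hO])] at h
          rcases ih _ _ _ _ h p hp with hmem | hgood
          · by_cases hX : pvAt g i j = "X"
            · rw [if_pos (by simp [hX])] at hmem
              rcases List.mem_append.mp hmem with h1 | h1
              · exact Or.inl h1
              · right
                have hpe : p = (i, j) := by simpa using h1
                subst hpe
                refine ⟨⟨hb.1, ?_, hb.2.2.1, ?_⟩, by rw [← pvAt_eq_pvCell]; exact hX⟩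
                · have := hb.2.1; simpa [PySem.List.len_eq, hsq.1] using this
                · have := hb.2.2.2; simpa [PySem.List.len_eq, hsq.1] using this
            · rw [if_neg (by simp [hX])] at hmem
              exact Or.inl hmem
          · exact Or.inr hgood
    · rw [if_neg hb] at h; cases h

-- gapRes: the visibility verdict a gap scan encodes, given wall set W
def gapRes (W : List (Int × Int)) : Option (List (Int × Int)) → Bool
  | none => false
  | some C => !(C.any (fun c => decide (c ∈ W)))

theorem gapRes_map_cons (W : List (Int × Int)) (p : Int × Int) (o : Option (List (Int × Int))) :
    gapRes W (o.map (fun C => p :: C))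
      = if p ∈ W then false else gapRes W o := by
  cases o with
  | none => simp [gapRes]
  | some C =>
    by_cases h : p ∈ W <;> simp [gapRes, h]

-- wall sets are in-range 'X' cells
def WallsOK (g : List (List String)) (N : Nat) (W : List (Int × Int)) : Prop :=
  ∀ p ∈ W, InR N p ∧ pvCell g p.1 p.2 = "X"

theorem cell_notin_walls {g : List (List String)} {N : Nat} {W : List (Int × Int)}
    (hW : WallsOK g N W) {i j : Int} (h : pvCell g i j ≠ "X") : (i, j) ∉ W := by
  intro hmem
  exact h (hW _ hmem).2

-- the four ray lemmas: A's while loop over the mutated grid = the verdict of B's gap scan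
theorem wUp_gap {g : List (List String)} {N : Nat} (hsq : SqN g N)
    {W : List (Int × Int)} (hW : WallsOK g N W) {y : Int} (hf1 : 0 ≤ y) (hf2 : y < (N : Int)) :
    ∀ (fuel : Nat) (t : Int), -1 ≤ t → t < (N : Int) → (t + 2).toNat ≤ fuel →
      wUp (pvPlace g W "O") y t = gapRes W (pvGap g (-1) 0 fuel t y []) := by
  have hsq' : SqN (pvPlace g W "O") N := sq_pvPlace hsq W "O" (fun p hp => (hW p hp).1)
  intro fuel
  induction fuel with
  | zero => intro t h1 _ h3; omega
  | succ fuel ih =>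
    intro t h1 h2 h3
    have hlen : PySem.List.len g = ((N : Nat) : Int) := by simp [hsq.1]
    by_cases ht : t < 0
    · have hnb : ¬(0 ≤ t ∧ t < PySem.List.len g ∧ 0 ≤ y ∧ y < PySem.List.len g) := by
        rw [hlen]; omega
      rw [wUp, dif_pos ht,
        show pvGap g (-1) 0 (fuel + 1) t y [] = none from by rw [pvGap, if_neg hnb]]
      rfl
    · have hInR : InR N (t, y) := ⟨by omega, h2, hf1, hf2⟩
      have hb : 0 ≤ t ∧ t < PySem.List.len g ∧ 0 ≤ y ∧ y < PySem.List.len g := by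
        rw [hlen]; omega
      have hcell := pvCell_pvPlace hsq "O" (fun p hp => (hW p hp).1) t y hInR
      rw [wUp, dif_neg ht, pvGap, if_pos hb, pvAt_eq_pvCell]
      by_cases hS : pvCell g t y = "S"
      · have hnw : (t, y) ∉ W := cell_notin_walls hW (by rw [hS]; decide)
        rw [hcell, if_neg hnw]
        simp [hS, gapRes]
      · by_cases hO : pvCell g t y = "O"
        · have hnw : (t, y) ∉ W := cell_notin_walls hW (by rw [hO]; decide)
          rw [hcell, if_neg hnw]
          simp [hS, hO, gapRes]
        · rw [if_neg (show ¬((pvCell g t y == "S") = true) by simp [hS]),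
            if_neg (show ¬((pvCell g t y == "O") = true) by simp [hO])]
          have hrec : pvGap g (-1) 0 fuel (t + (-1)) (y + 0) (if (pvCell g t y == "X") then [] ++ [(t, y)] else [])
              = (pvGap g (-1) 0 fuel (t - 1) y []).map
                  (fun C => (if pvCell g t y = "X" then [(t, y)] else []) ++ C) := by
            rw [show t + -1 = t - 1 by ring, show y + 0 = y by ring]
            by_cases hX : pvCell g t y = "X"
            · rw [if_pos (by simp [hX]), if_pos hX, pvGap_acc]
              simp
            · rw [if_neg (by simp [hX]), if_neg hX, pvGap_acc]
              simp
          by_cases hX : pvCell g t y = "X"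
          · by_cases hw : (t, y) ∈ W
            · rw [hcell, if_pos hw, hrec, if_pos hX,
                show (fun C => [(t, y)] ++ C) = (fun C => (t, y) :: C) from by funext C; rfl,
                gapRes_map_cons, if_pos hw]
              simp
            · rw [hcell, if_neg hw,
                if_neg (show ¬((pvCell g t y == "S") = true) by simp [hS]),
                if_neg (show ¬((pvCell g t y == "O") = true) by simp [hO]),
                hrec, if_pos hX,
                show (fun C => [(t, y)] ++ C) = (fun C => (t, y) :: C) from by funext C; rfl,
                gapRes_map_cons, if_neg hw]
              exact ih (t - 1) (by omega) (by omega) (by omega)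
          · have hnw : (t, y) ∉ W := cell_notin_walls hW hX
            rw [hcell, if_neg hnw,
              if_neg (show ¬((pvCell g t y == "S") = true) by simp [hS]),
              if_neg (show ¬((pvCell g t y == "O") = true) by simp [hO]),
              hrec, if_neg hX]
            simp only [List.nil_append, Option.map_id']
            exact ih (t - 1) (by omega) (by omega) (by omega)

theorem wDown_gap {g : List (List String)} {N : Nat} (hsq : SqN g N)
    {W : List (Int × Int)} (hW : WallsOK g N W) {y : Int} (hf1 : 0 ≤ y) (hf2 : y < (N : Int)) :
    ∀ (fuel : Nat) (t : Int), 0 ≤ t → t ≤ (N : Int) → ((N : Int) - t + 1).toNat ≤ fuel →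
      wDown (pvPlace g W "O") y t = gapRes W (pvGap g 1 0 fuel t y []) := by
  have hsq' : SqN (pvPlace g W "O") N := sq_pvPlace hsq W "O" (fun p hp => (hW p hp).1)
  intro fuel
  induction fuel with
  | zero => intro t h1 h2 h3; omega
  | succ fuel ih =>
    intro t h1 h2 h3
    have hlen : PySem.List.len g = ((N : Nat) : Int) := by simp [hsq.1]
    have hlen' : PySem.List.len (pvPlace g W "O") = ((N : Nat) : Int) := by simp [hsq'.1]
    by_cases ht : t < (N : Int)
    case neg =>
      have hnl : ¬ t < PySem.List.len (pvPlace g W "O") := by rw [hlen']; omega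
      have hnb : ¬(0 ≤ t ∧ t < PySem.List.len g ∧ 0 ≤ y ∧ y < PySem.List.len g) := by
        rw [hlen]; omega
      rw [wDown, dif_neg hnl,
        show pvGap g 1 0 (fuel + 1) t y [] = none from by rw [pvGap, if_neg hnb]]
      rfl
    case pos =>
      have hInR : InR N (t, y) := ⟨h1, ht, hf1, hf2⟩
      have htl : t < PySem.List.len (pvPlace g W "O") := by rw [hlen']; omega
      have hb : 0 ≤ t ∧ t < PySem.List.len g ∧ 0 ≤ y ∧ y < PySem.List.len g := by
        rw [hlen]; omega
      have hcell := pvCell_pvPlace hsq "O" (fun p hp => (hW p hp).1) t y hInR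
      rw [wDown, dif_pos htl, pvGap, if_pos hb, pvAt_eq_pvCell]
      by_cases hS : pvCell g t y = "S"
      · have hnw : (t, y) ∉ W := cell_notin_walls hW (by rw [hS]; decide)
        rw [hcell, if_neg hnw]
        simp [hS, gapRes]
      · by_cases hO : pvCell g t y = "O"
        · have hnw : (t, y) ∉ W := cell_notin_walls hW (by rw [hO]; decide)
          rw [hcell, if_neg hnw]
          simp [hS, hO, gapRes]
        · rw [if_neg (show ¬((pvCell g t y == "S") = true) by simp [hS]),
            if_neg (show ¬((pvCell g t y == "O") = true) by simp [hO])]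
          have hrec : pvGap g 1 0 fuel (t + 1) (y + 0) (if (pvCell g t y == "X") then [] ++ [(t, y)] else [])
              = (pvGap g 1 0 fuel (t + 1) y []).map
                  (fun C => (if pvCell g t y = "X" then [(t, y)] else []) ++ C) := by
            rw [show y + 0 = y by ring]
            by_cases hX : pvCell g t y = "X"
            · rw [if_pos (by simp [hX]), if_pos hX, pvGap_acc]
              simp
            · rw [if_neg (by simp [hX]), if_neg hX, pvGap_acc]
              simp
          by_cases hX : pvCell g t y = "X"
          · by_cases hw : (t, y) ∈ W
            · rw [hcell, if_pos hw, hrec, if_pos hX,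
                show (fun C => [(t, y)] ++ C) = (fun C => (t, y) :: C) from by funext C; rfl,
                gapRes_map_cons, if_pos hw]
              simp
            · rw [hcell, if_neg hw,
                if_neg (show ¬((pvCell g t y == "S") = true) by simp [hS]),
                if_neg (show ¬((pvCell g t y == "O") = true) by simp [hO]),
                hrec, if_pos hX,
                show (fun C => [(t, y)] ++ C) = (fun C => (t, y) :: C) from by funext C; rfl,
                gapRes_map_cons, if_neg hw]
              exact ih (t + 1) (by omega) (by omega) (by omega)
          · have hnw : (t, y) ∉ W := cell_notin_walls hW hX
            rw [hcell, if_neg hnw,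
              if_neg (show ¬((pvCell g t y == "S") = true) by simp [hS]),
              if_neg (show ¬((pvCell g t y == "O") = true) by simp [hO]),
              hrec, if_neg hX]
            simp only [List.nil_append, Option.map_id']
            exact ih (t + 1) (by omega) (by omega) (by omega)

theorem wLeft_gap {g : List (List String)} {N : Nat} (hsq : SqN g N)
    {W : List (Int × Int)} (hW : WallsOK g N W) {x : Int} (hf1 : 0 ≤ x) (hf2 : x < (N : Int)) :
    ∀ (fuel : Nat) (t : Int), -1 ≤ t → t < (N : Int) → (t + 2).toNat ≤ fuel →
      wLeft (pvPlace g W "O") x t = gapRes W (pvGap g 0 (-1) fuel x t []) := by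
  have hsq' : SqN (pvPlace g W "O") N := sq_pvPlace hsq W "O" (fun p hp => (hW p hp).1)
  intro fuel
  induction fuel with
  | zero => intro t h1 _ h3; omega
  | succ fuel ih =>
    intro t h1 h2 h3
    have hlen : PySem.List.len g = ((N : Nat) : Int) := by simp [hsq.1]
    by_cases ht : t < 0
    · have hnb : ¬(0 ≤ x ∧ x < PySem.List.len g ∧ 0 ≤ t ∧ t < PySem.List.len g) := by
        rw [hlen]; omega
      rw [wLeft, dif_pos ht,
        show pvGap g 0 (-1) (fuel + 1) x t [] = none from by rw [pvGap, if_neg hnb]]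
      rfl
    · have hInR : InR N (x, t) := ⟨hf1, hf2, by omega, h2⟩
      have hb : 0 ≤ x ∧ x < PySem.List.len g ∧ 0 ≤ t ∧ t < PySem.List.len g := by
        rw [hlen]; omega
      have hcell := pvCell_pvPlace hsq "O" (fun p hp => (hW p hp).1) x t hInR
      rw [wLeft, dif_neg ht, pvGap, if_pos hb, pvAt_eq_pvCell]
      by_cases hS : pvCell g x t = "S"
      · have hnw : (x, t) ∉ W := cell_notin_walls hW (by rw [hS]; decide)
        rw [hcell, if_neg hnw]
        simp [hS, gapRes]
      · by_cases hO : pvCell g x t = "O"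
        · have hnw : (x, t) ∉ W := cell_notin_walls hW (by rw [hO]; decide)
          rw [hcell, if_neg hnw]
          simp [hS, hO, gapRes]
        · rw [if_neg (show ¬((pvCell g x t == "S") = true) by simp [hS]),
            if_neg (show ¬((pvCell g x t == "O") = true) by simp [hO])]
          have hrec : pvGap g 0 (-1) fuel (x + 0) (t + (-1)) (if (pvCell g x t == "X") then [] ++ [(x, t)] else [])
              = (pvGap g 0 (-1) fuel x (t - 1) []).map
                  (fun C => (if pvCell g x t = "X" then [(x, t)] else []) ++ C) := by
            rw [show x + 0 = x by ring, show t + -1 = t - 1 by ring]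
            by_cases hX : pvCell g x t = "X"
            · rw [if_pos (by simp [hX]), if_pos hX, pvGap_acc]
              simp
            · rw [if_neg (by simp [hX]), if_neg hX, pvGap_acc]
              simp
          by_cases hX : pvCell g x t = "X"
          · by_cases hw : (x, t) ∈ W
            · rw [hcell, if_pos hw, hrec, if_pos hX,
                show (fun C => [(x, t)] ++ C) = (fun C => (x, t) :: C) from by funext C; rfl,
                gapRes_map_cons, if_pos hw]
              simp
            · rw [hcell, if_neg hw,
                if_neg (show ¬((pvCell g x t == "S") = true) by simp [hS]),
                if_neg (show ¬((pvCell g x t == "O") = true) by simp [hO]),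
                hrec, if_pos hX,
                show (fun C => [(x, t)] ++ C) = (fun C => (x, t) :: C) from by funext C; rfl,
                gapRes_map_cons, if_neg hw]
              exact ih (t - 1) (by omega) (by omega) (by omega)
          · have hnw : (x, t) ∉ W := cell_notin_walls hW hX
            rw [hcell, if_neg hnw,
              if_neg (show ¬((pvCell g x t == "S") = true) by simp [hS]),
              if_neg (show ¬((pvCell g x t == "O") = true) by simp [hO]),
              hrec, if_neg hX]
            simp only [List.nil_append, Option.map_id']
            exact ih (t - 1) (by omega) (by omega) (by omega)

theorem wRight_gap {g : List (List String)} {N : Nat} (hsq : SqN g N)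
    {W : List (Int × Int)} (hW : WallsOK g N W) {x : Int} (hf1 : 0 ≤ x) (hf2 : x < (N : Int)) :
    ∀ (fuel : Nat) (t : Int), 0 ≤ t → t ≤ (N : Int) → ((N : Int) - t + 1).toNat ≤ fuel →
      wRight (pvPlace g W "O") x t = gapRes W (pvGap g 0 1 fuel x t []) := by
  have hsq' : SqN (pvPlace g W "O") N := sq_pvPlace hsq W "O" (fun p hp => (hW p hp).1)
  intro fuel
  induction fuel with
  | zero => intro t h1 h2 h3; omega
  | succ fuel ih =>
    intro t h1 h2 h3
    have hlen : PySem.List.len g = ((N : Nat) : Int) := by simp [hsq.1]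
    have hlen' : PySem.List.len (pvPlace g W "O") = ((N : Nat) : Int) := by simp [hsq'.1]
    by_cases ht : t < (N : Int)
    case neg =>
      have hnl : ¬ t < PySem.List.len (pvPlace g W "O") := by rw [hlen']; omega
      have hnb : ¬(0 ≤ x ∧ x < PySem.List.len g ∧ 0 ≤ t ∧ t < PySem.List.len g) := by
        rw [hlen]; omega
      rw [wRight, dif_neg hnl,
        show pvGap g 0 1 (fuel + 1) x t [] = none from by rw [pvGap, if_neg hnb]]
      rfl
    case pos =>
      have hInR : InR N (x, t) := ⟨hf1, hf2, h1, ht⟩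
      have htl : t < PySem.List.len (pvPlace g W "O") := by rw [hlen']; omega
      have hb : 0 ≤ x ∧ x < PySem.List.len g ∧ 0 ≤ t ∧ t < PySem.List.len g := by
        rw [hlen]; omega
      have hcell := pvCell_pvPlace hsq "O" (fun p hp => (hW p hp).1) x t hInR
      rw [wRight, dif_pos htl, pvGap, if_pos hb, pvAt_eq_pvCell]
      by_cases hS : pvCell g x t = "S"
      · have hnw : (x, t) ∉ W := cell_notin_walls hW (by rw [hS]; decide)
        rw [hcell, if_neg hnw]
        simp [hS, gapRes]
      · by_cases hO : pvCell g x t = "O"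
        · have hnw : (x, t) ∉ W := cell_notin_walls hW (by rw [hO]; decide)
          rw [hcell, if_neg hnw]
          simp [hS, hO, gapRes]
        · rw [if_neg (show ¬((pvCell g x t == "S") = true) by simp [hS]),
            if_neg (show ¬((pvCell g x t == "O") = true) by simp [hO])]
          have hrec : pvGap g 0 1 fuel (x + 0) (t + 1) (if (pvCell g x t == "X") then [] ++ [(x, t)] else [])
              = (pvGap g 0 1 fuel x (t + 1) []).map
                  (fun C => (if pvCell g x t = "X" then [(x, t)] else []) ++ C) := by
            rw [show x + 0 = x by ring]
            by_cases hX : pvCell g x t = "X"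
            · rw [if_pos (by simp [hX]), if_pos hX, pvGap_acc]
              simp
            · rw [if_neg (by simp [hX]), if_neg hX, pvGap_acc]
              simp
          by_cases hX : pvCell g x t = "X"
          · by_cases hw : (x, t) ∈ W
            · rw [hcell, if_pos hw, hrec, if_pos hX,
                show (fun C => [(x, t)] ++ C) = (fun C => (x, t) :: C) from by funext C; rfl,
                gapRes_map_cons, if_pos hw]
              simp
            · rw [hcell, if_neg hw,
                if_neg (show ¬((pvCell g x t == "S") = true) by simp [hS]),
                if_neg (show ¬((pvCell g x t == "O") = true) by simp [hO]),
                hrec, if_pos hX,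
                show (fun C => [(x, t)] ++ C) = (fun C => (x, t) :: C) from by funext C; rfl,
                gapRes_map_cons, if_neg hw]
              exact ih (t + 1) (by omega) (by omega) (by omega)
          · have hnw : (x, t) ∉ W := cell_notin_walls hW hX
            rw [hcell, if_neg hnw,
              if_neg (show ¬((pvCell g x t == "S") = true) by simp [hS]),
              if_neg (show ¬((pvCell g x t == "O") = true) by simp [hO]),
              hrec, if_neg hX]
            simp only [List.nil_append, Option.map_id']
            exact ih (t + 1) (by omega) (by omega) (by omega)

-- the per-teacher constraint list (unfolds pvCons's inner fold over the 4 directions)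
def consOf (g : List (List String)) (p : Int × Int) : List (List (Int × Int)) :=
  (pvGap g (-1) 0 (g.length + 1) (p.1 + -1) (p.2 + 0) []).toList ++
  (pvGap g 1 0 (g.length + 1) (p.1 + 1) (p.2 + 0) []).toList ++
  (pvGap g 0 (-1) (g.length + 1) (p.1 + 0) (p.2 + -1) []).toList ++
  (pvGap g 0 1 (g.length + 1) (p.1 + 0) (p.2 + 1) []).toList

theorem pvCons_eq (g : List (List String)) (teachers : List (Int × Int)) :
    pvCons g teachers = teachers.flatMap (consOf g) := by
  unfold pvCons
  have hinner : ∀ (acc : List (List (Int × Int))) (p : Int × Int),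
      pvDirs.foldl (fun acc2 d =>
        match pvGap g d.1 d.2 (g.length + 1) (p.1 + d.1) (p.2 + d.2) [] with
        | some gap => acc2 ++ [gap]
        | none => acc2) acc = acc ++ consOf g p := by
    intro acc p
    simp only [pvDirs, List.foldl_cons, List.foldl_nil, consOf]
    cases pvGap g (-1) 0 (g.length + 1) (p.1 + -1) (p.2 + 0) [] <;>
      cases pvGap g 1 0 (g.length + 1) (p.1 + 1) (p.2 + 0) [] <;>
      cases pvGap g 0 (-1) (g.length + 1) (p.1 + 0) (p.2 + -1) [] <;>
      cases pvGap g 0 1 (g.length + 1) (p.1 + 0) (p.2 + 1) [] <;>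
      simp [Option.toList]
  simp only [hinner]
  rw [PySem.List.foldl_append_eq_flatMap]
  simp

-- blocked teacher = every one of its ≤4 constraints is hit by a wall of W
theorem watch_cons {g : List (List String)} {N : Nat} (hsq : SqN g N)
    {W : List (Int × Int)} (hW : WallsOK g N W) {p : Int × Int}
    (hIn : InR N p) (hT : pvCell g p.1 p.2 = "T") :
    watch p.1 p.2 (pvPlace g W "O") = (consOf g p).any (fun C => gapRes W (some C)) := by
  obtain ⟨x, y⟩ := p
  obtain ⟨h1, h2, h3, h4⟩ := hIn
  simp only at h1 h2 h3 h4
  replace hT : pvCell g x y = "T" := hT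
  show watch x y (pvPlace g W "O") = (consOf g (x, y)).any (fun C => gapRes W (some C))
  have hb : 0 ≤ x ∧ x < PySem.List.len g ∧ 0 ≤ y ∧ y < PySem.List.len g := by
    simp only [PySem.List.len_eq, hsq.1]; omega
  have hstep : ∀ (dx dy : Int),
      pvGap g dx dy (N + 2) x y [] = pvGap g dx dy (N + 1) (x + dx) (y + dy) [] := by
    intro dx dy
    rw [show (N + 2 : Nat) = (N + 1) + 1 by ring, pvGap, if_pos hb, pvAt_eq_pvCell, hT]
    simp
  have hgl : g.length = N := hsq.1
  have hu := wUp_gap hsq hW h3 h4 (N + 2) x (by omega) h2 (by omega)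
  have hd := wDown_gap hsq hW h3 h4 (N + 2) x h1 (by omega) (by omega)
  have hl := wLeft_gap hsq hW h1 h2 (N + 2) y (by omega) h4 (by omega)
  have hr := wRight_gap hsq hW h1 h2 (N + 2) y h3 (by omega) (by omega)
  have htl : ∀ o : Option (List (Int × Int)),
      o.toList.any (fun C => gapRes W (some C)) = gapRes W o := by
    intro o; cases o <;> simp [gapRes]
  rw [watch, hu, hd, hl, hr, hstep (-1) 0, hstep 1 0, hstep 0 (-1), hstep 0 1]
  simp [consOf, List.any_append, htl, hgl, Bool.or_assoc]

-- A's per-candidate test, as the hitting property of the constraint system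
theorem chkA_iff {g : List (List String)} {N : Nat} (hsq : SqN g N)
    {teachers : List (Int × Int)}
    (hT : ∀ p ∈ teachers, InR N p ∧ pvCell g p.1 p.2 = "T")
    {c : List (Int × Int)} (hc : WallsOK g N c) :
    chkA teachers g c = true ↔ HitAll (pvCons g teachers) c := by
  rw [chkA_eq_all, pvCons_eq]
  constructor
  · intro h C hC
    rw [List.all_eq_true] at h
    obtain ⟨p, hp, hCp⟩ := List.mem_flatMap.mp hC
    have hw := h p hp
    simp only [Bool.not_eq_true'] at hw
    rw [watch_cons hsq hc (hT p hp).1 (hT p hp).2] at hw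
    have := List.any_eq_false.mp hw _ hCp
    simp only [gapRes] at this
    simpa using this
  · intro h
    rw [List.all_eq_true]
    intro p hp
    simp only [Bool.not_eq_true']
    rw [watch_cons hsq hc (hT p hp).1 (hT p hp).2]
    apply List.any_eq_false.mpr
    intro C hC
    have hx := h C (List.mem_flatMap.mpr ⟨p, hp, hC⟩)
    simp only [gapRes]
    simpa using hx

-- unfolding lemmas for the branching search
theorem pvSolve_none (cons : List (List (Int × Int))) (walls : List (Int × Int))
    (h : cons.find? (fun C => !(C.any (fun w => decide (w ∈ walls)))) = none) :
    pvSolve cons walls = true := by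
  rw [pvSolve, h]

theorem pvSolve_some (cons : List (List (Int × Int))) (walls : List (Int × Int))
    (C : List (Int × Int))
    (h : cons.find? (fun C => !(C.any (fun w => decide (w ∈ walls)))) = some C) :
    pvSolve cons walls
      = if 3 ≤ walls.length then false
        else C.any (fun c => pvSolve cons (walls ++ [c])) := by
  rw [pvSolve, h]
  show (if _h : 3 ≤ walls.length then false
        else C.any fun c => pvSolve cons (walls ++ [c])) = _
  by_cases h3 : 3 ≤ walls.length
  · rw [dif_pos h3, if_pos h3]
  · rw [dif_neg h3, if_neg h3]

-- an unhit constraint consists of fresh cells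
theorem find_fresh {cons : List (List (Int × Int))} {walls C : List (Int × Int)}
    (h : cons.find? (fun C => !(C.any (fun w => decide (w ∈ walls)))) = some C) :
    ∀ x ∈ C, x ∉ walls := by
  intro x hx
  have hps := List.find?_some h
  rw [Bool.not_eq_true', List.any_eq_false] at hps
  simpa using hps x hx

-- completeness of the branching: a hitting extension of size ≤ 3 makes solve succeed
theorem solve_complete (cons : List (List (Int × Int))) :
    ∀ (ext walls : List (Int × Int)), walls.length + ext.length ≤ 3 →
      HitAll cons (walls ++ ext) → pvSolve cons walls = true := by
  intro ext
  induction hn : ext.length using Nat.strong_induction_on generalizing ext with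
  | _ n ih =>
  intro walls hlen hhit
  subst hn
  cases hfind : cons.find? (fun C => !(C.any (fun w => decide (w ∈ walls)))) with
  | none => exact pvSolve_none cons walls hfind
  | some C =>
    rw [pvSolve_some cons walls C hfind]
    have hCmem : C ∈ cons := List.mem_of_find?_eq_some hfind
    have hCnew : ∀ x ∈ C, x ∉ walls := find_fresh hfind
    obtain ⟨x, hxC, hxmem⟩ := hhit C hCmem
    have hxext : x ∈ ext := by
      rcases List.mem_append.mp hxmem with h | h
      · exact absurd h (hCnew x hxC)
      · exact h
    have hextlen : 1 ≤ ext.length := List.length_pos_of_mem hxext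
    have h3 : ¬ 3 ≤ walls.length := by omega
    rw [if_neg h3, List.any_eq_true]
    refine ⟨x, hxC, ?_⟩
    have hlt : (ext.erase x).length < ext.length := by
      rw [List.length_erase_of_mem hxext]; omega
    have hlen2 : (walls ++ [x]).length + (ext.erase x).length ≤ 3 := by
      rw [List.length_append, List.length_erase_of_mem hxext]
      simp only [List.length_cons, List.length_nil]
      omega
    refine ih (ext.erase x).length hlt (ext.erase x) rfl (walls ++ [x]) hlen2 ?_
    intro C' hC'
    obtain ⟨y, hyC', hy⟩ := hhit C' hC'
    refine ⟨y, hyC', ?_⟩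
    rcases List.mem_append.mp hy with h | h
    · simp [List.mem_append, h]
    · by_cases hyx : y = x
      · subst hyx; simp
      · simp [List.mem_append, List.mem_erase_of_ne hyx, h]

-- soundness: a successful solve yields a small fresh Nodup hitting extension from constraint cells
theorem solve_sound (cons : List (List (Int × Int))) :
    ∀ (m : Nat) (walls : List (Int × Int)), 3 - walls.length ≤ m →
      pvSolve cons walls = true →
      ∃ ext : List (Int × Int), ext.length ≤ 3 - walls.length ∧
        (∀ x ∈ ext, (∃ C ∈ cons, x ∈ C) ∧ x ∉ walls) ∧ ext.Nodup ∧
        HitAll cons (walls ++ ext) := by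
  intro m
  induction m with
  | zero =>
    intro walls hm hsolve
    cases hfind : cons.find? (fun C => !(C.any (fun w => decide (w ∈ walls)))) with
    | none =>
      refine ⟨[], by simp, by simp, List.nodup_nil, ?_⟩
      intro C hC
      have := List.find?_eq_none.mp hfind C hC
      simp only [Bool.not_eq_true', Bool.not_eq_false, List.any_eq_true,
        decide_eq_true_eq] at this
      obtain ⟨x, hx1, hx2⟩ := this
      exact ⟨x, hx1, by simp [hx2]⟩
    | some C =>
      rw [pvSolve_some cons walls C hfind, if_pos (by omega)] at hsolve
      cases hsolve
  | succ m ih =>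
    intro walls hm hsolve
    cases hfind : cons.find? (fun C => !(C.any (fun w => decide (w ∈ walls)))) with
    | none =>
      refine ⟨[], by simp, by simp, List.nodup_nil, ?_⟩
      intro C hC
      have := List.find?_eq_none.mp hfind C hC
      simp only [Bool.not_eq_true', Bool.not_eq_false, List.any_eq_true,
        decide_eq_true_eq] at this
      obtain ⟨x, hx1, hx2⟩ := this
      exact ⟨x, hx1, by simp [hx2]⟩
    | some C =>
      rw [pvSolve_some cons walls C hfind] at hsolve
      by_cases h3 : 3 ≤ walls.length
      · rw [if_pos h3] at hsolve; cases hsolve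
      · rw [if_neg h3, List.any_eq_true] at hsolve
        obtain ⟨c, hcC, hrec⟩ := hsolve
        have hCmem : C ∈ cons := List.mem_of_find?_eq_some hfind
        have hCnew : ∀ x ∈ C, x ∉ walls := find_fresh hfind
        have hmnext : 3 - (walls ++ [c]).length ≤ m := by
          simp only [List.length_append, List.length_cons, List.length_nil]
          omega
        obtain ⟨ext', hlen', hfresh', hnd', hhit'⟩ := ih (walls ++ [c]) hmnext hrec
        have hlenx : (walls ++ [c]).length = walls.length + 1 := by
          simp
        refine ⟨c :: ext', ?_, ?_, ?_, ?_⟩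
        · rw [hlenx] at hlen'
          simp only [List.length_cons]
          omega
        · intro x hx
          rcases List.mem_cons.mp hx with rfl | hx'
          · exact ⟨⟨C, hCmem, hcC⟩, hCnew _ hcC⟩
          · obtain ⟨hc1, hc2⟩ := hfresh' x hx'
            exact ⟨hc1, fun hmem => hc2 (by simp [List.mem_append, hmem])⟩
        · refine List.Nodup.cons ?_ hnd'
          intro hc
          exact (hfresh' c hc).2 (by simp [List.mem_append])
        · intro C' hC'
          obtain ⟨y, hy1, hy2⟩ := hhit' C' hC'
          refine ⟨y, hy1, ?_⟩
          simp only [List.append_assoc, List.singleton_append] at hy2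
          exact hy2

-- pad a sublist to an exact length
theorem sublist_pad {α : Type} :
    ∀ (s l : List α) (k : Nat), l.Sublist s → l.length ≤ k → k ≤ s.length →
      ∃ l', l.Sublist l' ∧ l'.Sublist s ∧ l'.length = k := by
  intro s
  induction s with
  | nil =>
    intro l k hsub hk1 hk2
    refine ⟨l, List.Sublist.refl l, hsub, ?_⟩
    have := hsub.length_le
    simp at hk2 this
    omega
  | cons a s' ihs =>
    intro l k hsub hk1 hk2
    cases k with
    | zero =>
      have : l = [] := List.eq_nil_of_length_eq_zero (by omega)
      subst this
      exact ⟨[], List.Sublist.refl [], List.nil_sublist _, rfl⟩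
    | succ k' =>
      cases hsub with
      | cons _ hsub' =>
        by_cases hleq : l.length = k' + 1
        · exact ⟨l, List.Sublist.refl l, List.Sublist.cons a hsub', hleq⟩
        · obtain ⟨l'', h1, h2, h3⟩ := ihs l k' hsub' (by omega) (by simp at hk2; omega)
          exact ⟨a :: l'', h1.trans (List.sublist_cons_self a l''),
            List.Sublist.cons₂ a h2, by simp [h3]⟩
      | cons₂ _ hsub' =>
        rename_i t
        obtain ⟨t', h1, h2, h3⟩ := ihs t k' hsub' (by simp at hk1; omega) (by simp at hk2; omega)
        exact ⟨a :: t', List.Sublist.cons₂ a h1, List.Sublist.cons₂ a h2, by simp [h3]⟩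

-- every constraint cell is an in-range 'X' cell
theorem cons_cells {g : List (List String)} {N : Nat} (hsq : SqN g N)
    (teachers : List (Int × Int)) :
    ∀ C ∈ pvCons g teachers, ∀ p ∈ C, InR N p ∧ pvCell g p.1 p.2 = "X" := by
  intro C hC p hp
  rw [pvCons_eq] at hC
  obtain ⟨q, _, hCq⟩ := List.mem_flatMap.mp hC
  simp only [consOf, List.mem_append] at hCq
  have hres : ∀ (dx dy i j : Int), C ∈ (pvGap g dx dy (g.length + 1) i j []).toList →
      InR N p ∧ pvCell g p.1 p.2 = "X" := by
    intro dx dy i j hmem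
    cases hg : pvGap g dx dy (g.length + 1) i j [] with
    | none => rw [hg] at hmem; cases hmem
    | some C' =>
      rw [hg] at hmem
      have : C = C' := by simpa using hmem
      subst this
      rcases pvGap_cells hsq dx dy _ _ _ _ _ hg p hp with h | h
      · cases h
      · exact h
  rcases hCq with ((h | h) | h) | h
  · exact hres _ _ _ _ h
  · exact hres _ _ _ _ h
  · exact hres _ _ _ _ h
  · exact hres _ _ _ _ h

-- ===== VERDICT (by name: the statement is the Claim_ definition above) =====
theorem solution_spec : Claim_equal_solution := by
  intro n array hdom hpre
  rcases hpre with hpre | ⟨hnL, hrows, hcount⟩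
  case inr =>
    unfold Spec_solution
    simp only [solution, solution_alt]
    rw [collect_eq]
    have hlen : (pvCollect array n "X").length < 3 := by
      rw [length_pvCollect]; exact hcount
    rw [show (pvCollect array n "X", pvCollect array n "T").1 = pvCollect array n "X" from rfl,
      show (pvCollect array n "X", pvCollect array n "T").2 = pvCollect array n "T" from rfl]
    rw [PySem.List.combinations_eq_nil_of_length_lt _ hlen]
    rw [if_pos hlen]
    rfl
  obtain ⟨hn, hrows⟩ := hpre
  have hsq : SqN array array.length := by
    refine ⟨rfl, ?_⟩
    intro i hi
    have := hrows array[i] (List.getElem_mem hi)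
    simpa [PySem.List.len_eq] using this
  have hnN : n = (array.length : Int) := by simpa [PySem.List.len_eq] using hn
  unfold Spec_solution
  simp only [solution, solution_alt]
  rw [collect_eq]
  rw [show (pvCollect array n "X", pvCollect array n "T").1 = pvCollect array n "X" from rfl,
    show (pvCollect array n "X", pvCollect array n "T").2 = pvCollect array n "T" from rfl]
  set spaces := pvCollect array n "X" with hspaces
  set teachers := pvCollect array n "T" with hteachers
  set N := array.length with hN
  have hT : ∀ p ∈ teachers, InR N p ∧ pvCell array p.1 p.2 = "T" := by
    intro p hp
    rw [hteachers, mem_pvCollect] at hp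
    exact ⟨⟨hp.1, by rw [← hnN]; exact hp.2.1, hp.2.2.1, by rw [← hnN]; exact hp.2.2.2.1⟩,
      by rw [← pvAt_eq_pvCell]; exact hp.2.2.2.2⟩
  have hS : ∀ p ∈ spaces, InR N p ∧ pvCell array p.1 p.2 = "X" := by
    intro p hp
    rw [hspaces, mem_pvCollect] at hp
    exact ⟨⟨hp.1, by rw [← hnN]; exact hp.2.1, hp.2.2.1, by rw [← hnN]; exact hp.2.2.2.1⟩,
      by rw [← pvAt_eq_pvCell]; exact hp.2.2.2.2⟩
  have hcands : ∀ c ∈ PySem.List.combinations spaces 3,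
      (∀ p ∈ c, InR N p) ∧ (∀ p ∈ c, pvCell array p.1 p.2 = "X") := by
    intro c hcm
    have hsub := ((PySem.List.mem_combinations_iff _ _ _).mp hcm).1.subset
    exact ⟨fun p hp => (hS p (hsub hp)).1, fun p hp => (hS p (hsub hp)).2⟩
  rw [aloop_eq hsq teachers _ hcands]
  by_cases hfew : spaces.length < 3
  · rw [PySem.List.combinations_eq_nil_of_length_lt _ hfew, if_pos hfew]
    rfl
  · rw [if_neg hfew]
    set cons := pvCons array teachers with hcons
    have hkey : (PySem.List.combinations spaces 3).any (chkA teachers array)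
        = pvSolve cons [] := by
      rw [Bool.eq_iff_iff]
      constructor
      · intro h
        obtain ⟨c, hcm, hchk⟩ := List.any_eq_true.mp h
        have hcW : WallsOK array N c := by
          intro p hp
          exact ⟨(hcands c hcm).1 p hp, (hcands c hcm).2 p hp⟩
        have hhit : HitAll cons c := (chkA_iff hsq hT hcW).mp hchk
        have hclen : c.length = 3 := (PySem.List.mem_combinations_iff _ _ _).mp hcm |>.2
        exact solve_complete cons c [] (by simp [hclen]) (by simpa using hhit)
      · intro h
        obtain ⟨ext, hlen, hfresh, hnd, hhit⟩ := solve_sound cons 3 [] (by simp) h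
        simp only [List.nil_append, List.length_nil, Nat.sub_zero] at hlen hhit
        have hsubset : ∀ x ∈ ext, x ∈ spaces := by
          intro x hx
          obtain ⟨⟨C, hC, hxC⟩, _⟩ := hfresh x hx
          have := cons_cells hsq teachers C hC x hxC
          rw [hspaces, mem_pvCollect]
          obtain ⟨⟨a1, a2, a3, a4⟩, a5⟩ := this
          exact ⟨a1, by rw [hnN]; exact a2, a3, by rw [hnN]; exact a4,
            by rw [pvAt_eq_pvCell]; exact a5⟩
        obtain ⟨ext', hperm, hsubl⟩ := (hnd.subperm hsubset)
        obtain ⟨c, hc1, hc2, hc3⟩ := sublist_pad spaces ext' 3 hsubl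
          (by rw [hperm.length_eq]; exact hlen) (by omega)
        apply List.any_eq_true.mpr
        refine ⟨c, (PySem.List.mem_combinations_iff _ _ _).mpr ⟨hc2, hc3⟩, ?_⟩
        have hcW : WallsOK array N c := by
          intro p hp
          exact hS p (hc2.subset hp)
        apply (chkA_iff hsq hT hcW).mpr
        intro C hC
        obtain ⟨x, hx1, hx2⟩ := hhit C hC
        exact ⟨x, hx1, hc1.subset (hperm.mem_iff.mpr hx2)⟩
    rw [hkey]
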